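-- pv_equiv track=rewrite | github.com/MrChepe09/Competitive-Programming-Codes | Practice Codes/MANYCHEF.py | signboard
-- ===== SOURCE A (Python) =====
-- def signboard(s):
--   arr = []
--   s = list(s)
--   for i in range(len(s)-4, -1, -1):
--     if((s[i]=='C' or s[i]=='?') and (s[i+1]=='H' or s[i+1]=='?') and (s[i+2]=='E' or s[i+2]=='?') and (s[i+3]=='F' or s[i+3]=='?')):
--       s[i] = 'C'
--       s[i+1] = 'H'
--       s[i+2] = 'E'
--       s[i+3] = 'F'
--   for i in range(len(s)):
--     if(s[i] == '?'):
--       s[i] = 'A'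
--   return ''.join(s)
-- ===== SOURCE B (Python) =====
-- def signboard(s):
--     n = len(s)
--     w = n - 3 if n >= 4 else 0          # number of window starts
--     match = [s[i] in 'C?' and s[i+1] in 'H?' and s[i+2] in 'E?' and s[i+3] in 'F?'
--              for i in range(w)]
--     claimed = [False] * w
--     for i in range(w - 1, -1, -1):
--         if match[i] and claimed[i+1:i+4].count(True) == 0:
--             claimed[i] = True
--     res = list(s)
--     for i in range(w):
--         if claimed[i]:
--             res[i] = 'C'; res[i+1] = 'H'; res[i+2] = 'E'; res[i+3] = 'F'
--     return ''.join('A' if c == '?' else c for c in res)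
-- ===== Notes on version B (the rewrite author's own statement) =====
-- stated objective: alternative
-- what changed: Replaces the in-place right-to-left greedy mutation of the character array by a pure three-phase computation: a match table against the original string, a right-to-left DP selecting claimed window starts (claimed[i] = match[i] and none of claimed[i+1..i+3]), and a separate build pass stamping the target word and filling the remaining wildcard positions.
import Mathlib
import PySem

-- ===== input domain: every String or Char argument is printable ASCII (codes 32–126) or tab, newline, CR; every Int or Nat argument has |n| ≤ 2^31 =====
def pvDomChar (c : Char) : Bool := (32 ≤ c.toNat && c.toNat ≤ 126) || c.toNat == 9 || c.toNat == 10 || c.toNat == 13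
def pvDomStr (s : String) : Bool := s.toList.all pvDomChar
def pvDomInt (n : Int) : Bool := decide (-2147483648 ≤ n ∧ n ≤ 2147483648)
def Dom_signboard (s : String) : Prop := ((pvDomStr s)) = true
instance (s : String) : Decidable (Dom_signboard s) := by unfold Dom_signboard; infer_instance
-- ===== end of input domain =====

-- B replaces A's in-place right-to-left greedy mutation by a pure three-phase pass:
-- a match table over the original string, a right-to-left DP choosing claimed window
-- starts, and a separate build pass filling the remaining wildcards (objective:
-- alternative decomposition, same O(n) cost).

-- ===== PORT A =====
-- A's window test on the CURRENT (mutated) array; indices i..i+3 are always in range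
-- when A reads them, so the total pyGetD form is exact.
def pvCheckA (a : List Char) (i : Int) : Bool :=
  (PySem.List.pyGetD a i ' ' == 'C' || PySem.List.pyGetD a i ' ' == '?') &&
  ((PySem.List.pyGetD a (i+1) ' ' == 'H' || PySem.List.pyGetD a (i+1) ' ' == '?') &&
  ((PySem.List.pyGetD a (i+2) ' ' == 'E' || PySem.List.pyGetD a (i+2) ' ' == '?') &&
  (PySem.List.pyGetD a (i+3) ' ' == 'F' || PySem.List.pyGetD a (i+3) ' ' == '?')))

def pvStepA (a : List Char) (i : Int) : List Char :=
  if pvCheckA a i then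
    PySem.List.pySetD (PySem.List.pySetD (PySem.List.pySetD (PySem.List.pySetD a i 'C') (i+1) 'H') (i+2) 'E') (i+3) 'F'
  else a

def signboard (s : String) : String :=
  let s0 := s.toList
  let s1 := (PySem.List.pyRange ((s0.length : Int) - 4) (-1) (-1)).foldl pvStepA s0
  let s2 := (PySem.List.pyRange 0 (s1.length : Int) 1).foldl
      (fun a i => if PySem.List.pyGetD a i ' ' == '?' then PySem.List.pySetD a i 'A' else a) s1
  String.ofList s2

-- ===== PORT B =====
-- B's window test on the ORIGINAL string (Python `s[i] in 'C?'` on in-range indices).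
def pvMatchB (l : List Char) (i : Nat) : Bool :=
  (l.getD i ' ' == 'C' || l.getD i ' ' == '?') &&
  ((l.getD (i+1) ' ' == 'H' || l.getD (i+1) ' ' == '?') &&
  ((l.getD (i+2) ' ' == 'E' || l.getD (i+2) ' ' == '?') &&
  (l.getD (i+3) ' ' == 'F' || l.getD (i+3) ' ' == '?')))

def signboard_alt (s : String) : String :=
  let l := s.toList
  let n := l.length
  let w := if 4 ≤ n then n - 3 else 0
  let mt := (List.range w).map (pvMatchB l)
  let claimed := (PySem.List.pyRange ((w : Int) - 1) (-1) (-1)).foldl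
      (fun c i => if PySem.List.pyGetD mt i false &&
                     (PySem.List.count (PySem.List.slice c (some (i+1)) (some (i+4))) true == 0)
                  then PySem.List.pySetD c i true else c)
      (List.replicate w false)
  let res := (List.range w).foldl
      (fun r i => if claimed.getD i false then
          (((r.set i 'C').set (i+1) 'H').set (i+2) 'E').set (i+3) 'F'
        else r) l
  String.ofList (res.map (fun c => if c == '?' then 'A' else c))

-- ===== PRECONDITION & SPEC =====
def Spec_signboard (s : String) (out : String) : Prop := out = signboard_alt s
instance (s : String) (out : String) : Decidable (Spec_signboard s out) := by unfold Spec_signboard; infer_instance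

-- ===== CLAIM (what is proved, stated in full; the proofs are below) =====
def Claim_equal_signboard : Prop := ∀ (s : String), Dom_signboard s → Spec_signboard s (signboard s)

-- ===== LEMMAS AND PROOFS =====

-- descending loop `for i in range(m-1,-1,-1)` as structural recursion (index m-1 first)
def pvDFold {α : Type} (f : α → Nat → α) : Nat → α → α
  | 0, a => a
  | m+1, a => pvDFold f m (f a m)

-- stamping C,H,E,F at window start k
def pvStampC (r : List Char) (k : Nat) : List Char :=
  (((r.set k 'C').set (k+1) 'H').set (k+2) 'E').set (k+3) 'F'

-- A's loop body at a Nat index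
def pvStepAN (a : List Char) (k : Nat) : List Char :=
  if pvMatchB a k then pvStampC a k else a

-- B's claimed-loop body at a Nat index, in getD form
def pvStepBN (mt : List Bool) (c : List Bool) (k : Nat) : List Bool :=
  if mt.getD k false && !(c.getD (k+1) false || c.getD (k+2) false || c.getD (k+3) false)
  then c.set k true else c

-- B's build pass over window starts 0..m-1
def pvStampAll (orig : List Char) (c : List Bool) : Nat → List Char
  | 0 => orig
  | m+1 => let r := pvStampAll orig c m
           if c.getD m false then pvStampC r m else r

-- A's second loop ('?' → 'A') over indices 0..m-1
def pvQAll (l : List Char) : Nat → List Char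
  | 0 => l
  | m+1 => let r := pvQAll l m
           if r.getD m ' ' == '?' then r.set m 'A' else r

lemma pvPyRange_down_cons (m : Nat) :
    PySem.List.pyRange (((m+1 : Nat) : Int) - 1) (-1) (-1)
      = ((m : Nat) : Int) :: PySem.List.pyRange ((m : Int) - 1) (-1) (-1) := by
  simp only [PySem.List.pyRange]
  rw [if_neg (by norm_num : ¬ ((-1:Int) = 0)), if_neg (by norm_num : ¬ ((-1:Int) = 0)),
      if_neg (by norm_num : ¬ ((0:Int) < -1)), if_neg (by norm_num : ¬ ((0:Int) < -1))]
  rw [if_pos (by push_cast; omega : (-1:Int) < ((m+1 : Nat) : Int) - 1)]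
  have hc1 : ((((m+1 : Nat) : Int) - 1) - (-1) + -(-1) - 1) / -(-1) = ((m+1 : Nat) : Int) := by
    push_cast; ring_nf; simp
  rw [hc1]
  have hc2 : (((m+1 : Nat) : Int)).toNat = m + 1 := by omega
  rw [hc2, List.range_succ_eq_map, List.map_cons, List.map_map]
  rcases Nat.eq_zero_or_pos m with hm | hm
  · subst hm
    norm_num
  · rw [if_pos (by omega : (-1:Int) < (m:Int) - 1)]
    have hc3 : ((((m : Nat) : Int) - 1) - (-1) + -(-1) - 1) / -(-1) = ((m : Nat) : Int) := by
      push_cast; ring_nf; simp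
    rw [hc3, (by omega : (((m : Nat) : Int)).toNat = m)]
    congr 1
    · push_cast; ring
    · refine List.map_congr_left fun k hk => ?_
      simp only [Function.comp]
      push_cast; ring

lemma pvPyRange_down_neg (a : Int) (h : a < 0) : PySem.List.pyRange a (-1) (-1) = [] := by
  simp only [PySem.List.pyRange]
  norm_num
  intro h2
  omega

lemma pvFoldl_pyRange_down {α : Type} (g : α → Int → α) (m : Nat) (a : α) :
    (PySem.List.pyRange ((m : Int) - 1) (-1) (-1)).foldl g a = pvDFold (fun x k => g x (k : Int)) m a := by
  induction m generalizing a with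
  | zero =>
      rw [(by norm_num : ((0:Nat):Int) - 1 = -1), pvPyRange_down_neg _ (by norm_num)]
      rfl
  | succ m ih =>
      rw [pvPyRange_down_cons, List.foldl_cons, ih]
      rfl

lemma pvStepA_cast (a : List Char) (k : Nat) : pvStepA a (k : Int) = pvStepAN a k := by
  have e1 : ((k : Int) + 1) = ((k + 1 : Nat) : Int) := by push_cast; ring
  have e2 : ((k : Int) + 2) = ((k + 2 : Nat) : Int) := by push_cast; ring
  have e3 : ((k : Int) + 3) = ((k + 3 : Nat) : Int) := by push_cast; ring
  simp only [pvStepA, pvCheckA, pvStepAN, pvMatchB, pvStampC, e1, e2, e3,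
    PySem.List.pyGetD_natCast, PySem.List.pySetD_natCast]

lemma pvCount3 (l : List Bool) :
    (PySem.List.count (l.take 3) true == 0) = !(l.getD 0 false || l.getD 1 false || l.getD 2 false) := by
  match l with
  | [] => rfl
  | [a] => cases a <;> rfl
  | [a, b] => cases a <;> cases b <;> rfl
  | a :: b :: c :: t => cases a <;> cases b <;> cases c <;> rfl

lemma pvStepB_cast (mt c : List Bool) (k : Nat) :
    (if PySem.List.pyGetD mt (k : Int) false &&
         (PySem.List.count (PySem.List.slice c (some ((k : Int)+1)) (some ((k : Int)+4))) true == 0)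
     then PySem.List.pySetD c (k : Int) true else c) = pvStepBN mt c k := by
  have e1 : ((k : Int) + 1) = ((k + 1 : Nat) : Int) := by push_cast; ring
  have e4 : ((k : Int) + 4) = ((k + 4 : Nat) : Int) := by push_cast; ring
  rw [e1, e4, PySem.List.slice_natCast, PySem.List.pyGetD_natCast, PySem.List.pySetD_natCast]
  rw [(by omega : (k + 4) - (k + 1) = 3), pvCount3]
  have e6 : ∀ i, (c.drop (k+1)).getD i false = c.getD (k+1+i) false := by
    intro i
    simp [List.getD_eq_getElem?_getD, List.getElem?_drop]
  rw [pvStepBN, e6 0, e6 1, e6 2]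

lemma pvStampAll_length (orig : List Char) (c : List Bool) (m : Nat) :
    (pvStampAll orig c m).length = orig.length := by
  induction m with
  | zero => rfl
  | succ m ih => simp only [pvStampAll]; split <;> simp [pvStampC, ih]

lemma pvGetD_set {α : Type} (xs : List α) (i : Nat) (v : α) (p : Nat) (d : α) :
    (xs.set i v).getD p d = if i = p ∧ i < xs.length then v else xs.getD p d := by
  simp only [List.getD_eq_getElem?_getD, List.getElem?_set]
  by_cases h1 : i = p
  · subst h1
    by_cases h2 : i < xs.length <;> simp [h2]
  · simp [h1]

-- priority test: does a claimed window starting t places left of p (among starts < m) cover p?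
def pvCond (c : List Bool) (m p t : Nat) : Bool :=
  decide (t ≤ p) && (decide (p - t < m) && c.getD (p - t) false)

-- the character the stamped image holds at position p
def pvPix (orig : List Char) (c : List Bool) (m p : Nat) (d : Char) : Char :=
  if pvCond c m p 0 then 'C'
  else if pvCond c m p 1 then 'H'
  else if pvCond c m p 2 then 'E'
  else if pvCond c m p 3 then 'F'
  else orig.getD p d

lemma pvCond_stable (c : List Bool) (m p t : Nat) (hcm : c.getD m false = false) :
    pvCond c (m+1) p t = pvCond c m p t := by
  unfold pvCond
  by_cases h2 : p - t = m
  · rw [h2, hcm]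
    simp
  · have : (p - t < m + 1) ↔ (p - t < m) := by omega
    simp [this]

lemma pvStampC_getD (r : List Char) (k : Nat) (p : Nat) (d : Char) (hk : k + 3 < r.length) :
    (pvStampC r k).getD p d =
      if k = p then 'C' else if k+1 = p then 'H' else if k+2 = p then 'E' else if k+3 = p then 'F'
      else r.getD p d := by
  rw [pvStampC, pvGetD_set, pvGetD_set, pvGetD_set, pvGetD_set]
  simp only [List.length_set]
  split_ifs <;> first | rfl | omega

lemma pvStampAll_getD (orig : List Char) (c : List Bool) (m : Nat)
    (hm : m + 3 ≤ orig.length) (p : Nat) (d : Char) :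
    (pvStampAll orig c m).getD p d = pvPix orig c m p d := by
  induction m with
  | zero =>
      simp [pvStampAll, pvPix, pvCond]
  | succ m ih =>
      have hm' : m + 3 ≤ orig.length := by omega
      have hlen : (pvStampAll orig c m).length = orig.length := pvStampAll_length orig c m
      rw [pvStampAll]
      cases hcm : c.getD m false with
      | false =>
          simp only [if_false, Bool.false_eq_true]
          rw [ih hm', pvPix, pvPix, pvCond_stable _ _ _ _ hcm, pvCond_stable _ _ _ _ hcm,
              pvCond_stable _ _ _ _ hcm, pvCond_stable _ _ _ _ hcm]
      | true =>
          have hcm' : (getElem? c m).getD false = true := by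
            simpa [List.getD_eq_getElem?_getD] using hcm
          simp only [if_true]
          rw [pvStampC_getD _ _ _ _ (by omega)]
          by_cases h0 : m = p
          · rw [if_pos h0]
            subst h0
            simp [pvPix, pvCond, hcm']
          · rw [if_neg h0]
            by_cases h1 : m + 1 = p
            · rw [if_pos h1]
              subst h1
              simp [pvPix, pvCond, hcm']
            · rw [if_neg h1]
              by_cases h2 : m + 2 = p
              · rw [if_pos h2]
                subst h2
                simp [pvPix, pvCond, hcm']
              · rw [if_neg h2]
                by_cases h3 : m + 3 = p
                · rw [if_pos h3]
                  subst h3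
                  simp [pvPix, pvCond, hcm']
                · rw [if_neg h3, ih hm', pvPix, pvPix]
                  have key : ∀ t : Nat, t ≤ 3 → pvCond c (m+1) p t = pvCond c m p t := by
                    intro t ht3
                    unfold pvCond
                    by_cases hq2 : p - t = m
                    · have ht : ¬ t ≤ p := by omega
                      simp [ht]
                    · have : (p - t < m + 1) ↔ (p - t < m) := by omega
                      simp [this]
                  rw [key 0 (by omega), key 1 (by omega), key 2 (by omega), key 3 (by omega)]

lemma pvStampAll_foldl (orig : List Char) (c : List Bool) (m : Nat) :
    (List.range m).foldl
      (fun r i => if c.getD i false then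
          (((r.set i 'C').set (i+1) 'H').set (i+2) 'E').set (i+3) 'F'
        else r) orig = pvStampAll orig c m := by
  induction m with
  | zero => rfl
  | succ m ih =>
      rw [List.range_succ, List.foldl_append, ih]
      simp only [List.foldl_cons, List.foldl_nil, pvStampAll, pvStampC]

lemma pvQAll_foldl (l : List Char) (m : Nat) :
    (List.range m).foldl
      (fun a i => if a.getD i ' ' == '?' then a.set i 'A' else a) l = pvQAll l m := by
  induction m with
  | zero => rfl
  | succ m ih =>
      rw [List.range_succ, List.foldl_append, ih]
      simp only [List.foldl_cons, List.foldl_nil, pvQAll]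

lemma pvQAll_length (l : List Char) (m : Nat) : (pvQAll l m).length = l.length := by
  induction m with
  | zero => rfl
  | succ m ih => simp only [pvQAll]; split <;> simp [ih]

lemma pvQAll_getD (l : List Char) (m : Nat) (hm : m ≤ l.length) (p : Nat) (d : Char) :
    (pvQAll l m).getD p d =
      if p < m then (if l.getD p ' ' == '?' then 'A' else l.getD p d) else l.getD p d := by
  induction m generalizing p d with
  | zero => simp [pvQAll]
  | succ m ih =>
      have hm' : m ≤ l.length := by omega
      have hrm : (pvQAll l m).getD m ' ' = l.getD m ' ' := by
        rw [ih hm' m ' ']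
        simp
      rw [pvQAll]
      simp only [hrm]
      split
      · rw [pvGetD_set, pvQAll_length]
        by_cases hp : m = p
        · subst hp
          rw [if_pos ⟨rfl, by omega⟩, if_pos (by omega)]
          simp_all
        · rw [if_neg (by omega), ih hm' p d]
          simp only [(by omega : (p < m + 1) ↔ (p < m))]
      · rw [ih hm' p d]
        by_cases hp : p = m
        · subst hp
          rw [if_neg (by omega), if_pos (by omega)]
          simp_all
        · simp only [(by omega : (p < m + 1) ↔ (p < m))]

lemma pvQAll_map (l : List Char) :
    pvQAll l l.length = l.map (fun c => if c == '?' then 'A' else c) := by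
  apply List.ext_getElem (by simp [pvQAll_length])
  intro i h1 h2
  have h3 : i < l.length := by simpa [pvQAll_length] using h1
  rw [← List.getD_eq_getElem _ ' ' h1, pvQAll_getD l l.length le_rfl i ' ', if_pos h3,
    List.getElem_map, List.getD_eq_getElem _ ' ' h3]

lemma pvGetD_replicate (w : Nat) (j : Nat) : (List.replicate w false).getD j false = false := by
  rcases lt_or_ge j w with h | h
  · exact List.getD_replicate _ h
  · rw [List.getD_eq_getElem?_getD, List.getElem?_eq_none (by simpa using h)]
    rfl

lemma pvStampAll_replicate (orig : List Char) (w : Nat) (hw : w + 3 ≤ orig.length) :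
    pvStampAll orig (List.replicate w false) w = orig := by
  apply List.ext_getElem (by simp [pvStampAll_length])
  intro i h1 h2
  rw [← List.getD_eq_getElem _ ' ' h1, ← List.getD_eq_getElem _ ' ' h2,
    pvStampAll_getD _ _ _ hw]
  simp [pvPix, pvCond]

-- helper facts about pvCond over a claimed list of length w
lemma pvGetD_oob (c : List Bool) (w : Nat) (hc : c.length = w) (j : Nat) (hj : w ≤ j) :
    c.getD j false = false := by
  rw [List.getD_eq_getElem?_getD, List.getElem?_eq_none (by omega)]
  rfl

lemma pvCond_eq (c : List Bool) (w : Nat) (hc : c.length = w) (q t : Nat) (ht : t ≤ q) :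
    pvCond c w q t = c.getD (q - t) false := by
  unfold pvCond
  by_cases h' : q - t < w
  · simp [ht, h']
  · rw [pvGetD_oob c w hc (q - t) (by omega)]
    simp [ht, h']

lemma pvCond_false_of_gt (c : List Bool) (w : Nat) (q t : Nat) (ht : ¬ t ≤ q) :
    pvCond c w q t = false := by
  simp [pvCond, ht]

lemma pvCond_low (c : List Bool) (w : Nat) (hc : c.length = w) (q t : Nat)
    (hlow' : c.getD (q - t) false = false) : pvCond c w q t = false := by
  by_cases ht : t ≤ q
  · rw [pvCond_eq c w hc q t ht, hlow']
  · exact pvCond_false_of_gt c w q t ht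

lemma pvSet_getD (c : List Bool) (w m : Nat) (hc : c.length = w) (hm : m < w) (j : Nat) :
    (c.set m true).getD j false = if m = j then true else c.getD j false := by
  rw [pvGetD_set]
  by_cases hj : m = j
  · rw [if_pos ⟨hj, by omega⟩, if_pos hj]
  · rw [if_neg (by tauto), if_neg hj]

lemma pvMt_getD (orig : List Char) (w m : Nat) (hm : m < w) :
    ((List.range w).map (pvMatchB orig)).getD m false = pvMatchB orig m := by
  rw [List.getD_eq_getElem _ _ (by simpa using hm), List.getElem_map, List.getElem_range]

-- stamping a fresh, non-overlapped window commutes with the build pass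
lemma pvStampSet (orig : List Char) (w : Nat) (hw : w + 3 ≤ orig.length) (m : Nat)
    (c : List Bool) (hm : m < w) (hc : c.length = w)
    (hb1 : c.getD (m+1) false = false) (hb2 : c.getD (m+2) false = false)
    (hb3 : c.getD (m+3) false = false) :
    pvStampC (pvStampAll orig c w) m = pvStampAll orig (c.set m true) w := by
  have hlen : (pvStampAll orig c w).length = orig.length := pvStampAll_length orig c w
  have hc' : (c.set m true).length = w := by simp [hc]
  have hset := pvSet_getD c w m hc hm
  apply List.ext_getElem (by simp [pvStampC, pvStampAll_length, hlen])
  intro p h1 h2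
  rw [← List.getD_eq_getElem _ ' ' h1, ← List.getD_eq_getElem _ ' ' h2,
    pvStampC_getD _ _ _ _ (by omega), pvStampAll_getD orig (c.set m true) w hw]
  by_cases p0 : m = p
  · subst p0
    rw [if_pos rfl, pvPix, pvCond_eq (c.set m true) w hc' m 0 (by omega), Nat.sub_zero,
      hset m, if_pos rfl]
    simp
  · rw [if_neg p0]
    by_cases p1 : m + 1 = p
    · subst p1
      rw [if_pos rfl, pvPix, pvCond_eq (c.set m true) w hc' (m+1) 0 (by omega), Nat.sub_zero,
        hset (m+1), if_neg (show ¬ (m = m+1) by omega), hb1,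
        pvCond_eq (c.set m true) w hc' (m+1) 1 (by omega), (by omega : m + 1 - 1 = m),
        hset m, if_pos rfl]
      simp
    · rw [if_neg p1]
      by_cases p2 : m + 2 = p
      · subst p2
        rw [if_pos rfl, pvPix, pvCond_eq (c.set m true) w hc' (m+2) 0 (by omega), Nat.sub_zero,
          hset (m+2), if_neg (show ¬ (m = m+2) by omega), hb2,
          pvCond_eq (c.set m true) w hc' (m+2) 1 (by omega), (by omega : m + 2 - 1 = m + 1),
          hset (m+1), if_neg (show ¬ (m = m+1) by omega), hb1,
          pvCond_eq (c.set m true) w hc' (m+2) 2 (by omega), (by omega : m + 2 - 2 = m),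
          hset m, if_pos rfl]
        simp
      · rw [if_neg p2]
        by_cases p3 : m + 3 = p
        · subst p3
          rw [if_pos rfl, pvPix, pvCond_eq (c.set m true) w hc' (m+3) 0 (by omega), Nat.sub_zero,
            hset (m+3), if_neg (show ¬ (m = m+3) by omega), hb3,
            pvCond_eq (c.set m true) w hc' (m+3) 1 (by omega), (by omega : m + 3 - 1 = m + 2),
            hset (m+2), if_neg (show ¬ (m = m+2) by omega), hb2,
            pvCond_eq (c.set m true) w hc' (m+3) 2 (by omega), (by omega : m + 3 - 2 = m + 1),
            hset (m+1), if_neg (show ¬ (m = m+1) by omega), hb1,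
            pvCond_eq (c.set m true) w hc' (m+3) 3 (by omega), (by omega : m + 3 - 3 = m),
            hset m, if_pos rfl]
          simp
        · rw [if_neg p3, pvStampAll_getD orig c w hw, pvPix, pvPix]
          have key : ∀ t : Nat, t ≤ 3 → pvCond (c.set m true) w p t = pvCond c w p t := by
            intro t ht3
            by_cases ht : t ≤ p
            · rw [pvCond_eq (c.set m true) w hc' p t ht, pvCond_eq c w hc p t ht, hset,
                if_neg (by omega)]
            · rw [pvCond_false_of_gt _ _ _ _ ht, pvCond_false_of_gt _ _ _ _ ht]
          rw [key 0 (by omega), key 1 (by omega), key 2 (by omega), key 3 (by omega)]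

-- one loop step: A's conditional stamp on the stamped image is B's DP step on the claimed list
set_option maxHeartbeats 1000000 in
lemma pvStepEq (orig : List Char) (w : Nat) (hw : w + 3 ≤ orig.length) (m : Nat)
    (c : List Bool) (hm : m < w) (hc : c.length = w)
    (hlow : ∀ j, j < m + 1 → c.getD j false = false) :
    pvStepAN (pvStampAll orig c w) m =
      pvStampAll orig (pvStepBN ((List.range w).map (pvMatchB orig)) c m) w := by
  have hPix := pvStampAll_getD orig c w hw
  have e0 : (pvStampAll orig c w).getD m ' ' = orig.getD m ' ' := by
    rw [hPix, pvPix, pvCond_low c w hc m 0 (hlow _ (by omega)),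
      pvCond_low c w hc m 1 (hlow _ (by omega)), pvCond_low c w hc m 2 (hlow _ (by omega)),
      pvCond_low c w hc m 3 (hlow _ (by omega))]
    simp
  have e1 : (pvStampAll orig c w).getD (m+1) ' ' =
      if c.getD (m+1) false then 'C' else orig.getD (m+1) ' ' := by
    rw [hPix, pvPix, pvCond_eq c w hc (m+1) 0 (by omega), Nat.sub_zero,
      pvCond_low c w hc (m+1) 1 (hlow _ (by omega)),
      pvCond_low c w hc (m+1) 2 (hlow _ (by omega)),
      pvCond_low c w hc (m+1) 3 (hlow _ (by omega))]
    cases c.getD (m+1) false <;> simp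
  have e2 : (pvStampAll orig c w).getD (m+2) ' ' =
      if c.getD (m+2) false then 'C' else if c.getD (m+1) false then 'H'
      else orig.getD (m+2) ' ' := by
    rw [hPix, pvPix, pvCond_eq c w hc (m+2) 0 (by omega), Nat.sub_zero,
      pvCond_eq c w hc (m+2) 1 (by omega), (by omega : m + 2 - 1 = m + 1),
      pvCond_low c w hc (m+2) 2 (hlow _ (by omega)),
      pvCond_low c w hc (m+2) 3 (hlow _ (by omega))]
    cases c.getD (m+2) false <;> cases c.getD (m+1) false <;> simp
  have e3 : (pvStampAll orig c w).getD (m+3) ' ' =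
      if c.getD (m+3) false then 'C' else if c.getD (m+2) false then 'H'
      else if c.getD (m+1) false then 'E' else orig.getD (m+3) ' ' := by
    rw [hPix, pvPix, pvCond_eq c w hc (m+3) 0 (by omega), Nat.sub_zero,
      pvCond_eq c w hc (m+3) 1 (by omega), (by omega : m + 3 - 1 = m + 2),
      pvCond_eq c w hc (m+3) 2 (by omega), (by omega : m + 3 - 2 = m + 1),
      pvCond_low c w hc (m+3) 3 (hlow _ (by omega))]
    cases c.getD (m+3) false <;> cases c.getD (m+2) false <;> cases c.getD (m+1) false <;> simp
  have hguard : pvMatchB (pvStampAll orig c w) m =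
      (pvMatchB orig m &&
        !(c.getD (m+1) false || c.getD (m+2) false || c.getD (m+3) false)) := by
    rw [pvMatchB, e0, e1, e2, e3]
    rw [show pvMatchB orig m =
      ((orig.getD m ' ' == 'C' || orig.getD m ' ' == '?') &&
      ((orig.getD (m+1) ' ' == 'H' || orig.getD (m+1) ' ' == '?') &&
      ((orig.getD (m+2) ' ' == 'E' || orig.getD (m+2) ' ' == '?') &&
      (orig.getD (m+3) ' ' == 'F' || orig.getD (m+3) ' ' == '?')))) from rfl]
    cases c.getD (m+1) false <;> cases c.getD (m+2) false <;> cases c.getD (m+3) false <;>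
      simp
  rw [pvStepAN, pvStepBN, hguard, pvMt_getD orig w m hm]
  cases hg : (pvMatchB orig m &&
      !(c.getD (m+1) false || c.getD (m+2) false || c.getD (m+3) false)) with
  | false => simp
  | true =>
      simp only [if_true]
      have hb : c.getD (m+1) false = false ∧ c.getD (m+2) false = false ∧
          c.getD (m+3) false = false := by
        cases h1 : c.getD (m+1) false <;> cases h2 : c.getD (m+2) false <;>
          cases h3 : c.getD (m+3) false <;> simp_all
      exact pvStampSet orig w hw m c hm hc hb.1 hb.2.1 hb.2.2

-- the key simulation: A's mutated array is always the stamped image of B's claimed list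
lemma pvKey (orig : List Char) (w : Nat) (hw : w + 3 ≤ orig.length) :
    ∀ (m : Nat) (c : List Bool), m ≤ w → c.length = w →
      (∀ j, j < m → c.getD j false = false) →
      pvDFold pvStepAN m (pvStampAll orig c w) =
        pvStampAll orig (pvDFold (pvStepBN ((List.range w).map (pvMatchB orig))) m c) w := by
  intro m
  induction m with
  | zero => intro c _ _ _; rfl
  | succ m ih =>
      intro c hmw hc hlow
      have hstep := pvStepEq orig w hw m c (by omega) hc hlow
      rw [pvDFold, pvDFold, hstep]
      apply ih
      · omega
      · rw [pvStepBN]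
        split <;> simp [hc]
      · intro j hj
        rw [pvStepBN]
        split
        · rw [pvSet_getD c w m hc (by omega) j, if_neg (by omega)]
          exact hlow j (by omega)
        · exact hlow j (by omega)

-- assembling both ports into the common normal form  String.ofList ((pvStampAll …).map …)
lemma pvMain (s : String) : signboard s = signboard_alt s := by
  simp only [signboard, signboard_alt]
  have hfc : (fun (a : List Char) (k : Nat) =>
      if PySem.List.pyGetD a (k : Int) ' ' == '?' then PySem.List.pySetD a (k : Int) 'A' else a)
      = (fun (a : List Char) (k : Nat) => if a.getD k ' ' == '?' then a.set k 'A' else a) := by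
    funext a k
    rw [PySem.List.pyGetD_natCast, PySem.List.pySetD_natCast]
  by_cases h4 : 4 ≤ s.toList.length
  · set l := s.toList with hl
    rw [if_pos h4]
    set w := l.length - 3 with hwdef
    have hw3 : w + 3 ≤ l.length := by omega
    have harg : ((l.length : Int) - 4) = ((w : Int) - 1) := by
      rw [hwdef, Nat.cast_sub (by omega)]
      ring
    rw [harg, pvFoldl_pyRange_down pvStepA w l, pvFoldl_pyRange_down _ w (List.replicate w false)]
    have hfa : (fun (a : List Char) (k : Nat) => pvStepA a (k : Int)) = pvStepAN := by
      funext a k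
      exact pvStepA_cast a k
    have hfb : (fun (c : List Bool) (k : Nat) =>
        if PySem.List.pyGetD ((List.range w).map (pvMatchB l)) (k : Int) false &&
           (PySem.List.count (PySem.List.slice c (some ((k : Int)+1)) (some ((k : Int)+4))) true == 0)
        then PySem.List.pySetD c (k : Int) true else c)
        = pvStepBN ((List.range w).map (pvMatchB l)) := by
      funext c k
      exact pvStepB_cast ((List.range w).map (pvMatchB l)) c k
    rw [hfa, hfb]
    have hX : pvDFold pvStepAN w l =
        pvStampAll l
          (pvDFold (pvStepBN ((List.range w).map (pvMatchB l))) w (List.replicate w false)) w := by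
      conv_lhs => rw [← pvStampAll_replicate l w hw3]
      exact pvKey l w hw3 w (List.replicate w false) le_rfl (by simp)
        (fun j _ => pvGetD_replicate w j)
    rw [hX, pvStampAll_foldl, PySem.List.pyRange_zero_natCast, List.foldl_map, hfc,
      pvQAll_foldl, pvQAll_map]
  · rw [if_neg h4, pvPyRange_down_neg ((s.toList.length : Int) - 4) (by omega),
      pvPyRange_down_neg (((0 : Nat) : Int) - 1) (by norm_num)]
    simp only [List.foldl_nil, List.range_zero]
    rw [PySem.List.pyRange_zero_natCast, List.foldl_map, hfc, pvQAll_foldl, pvQAll_map]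

-- ===== VERDICT (by name: the statement is the Claim_ definition above) =====
theorem signboard_spec : Claim_equal_signboard := by
  intro s _
  unfold Spec_signboard
  exact pvMain s
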